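-- pv_equiv track=rewrite | github.com/Ziqiao-git/benchmark | data_anaylysis/random_judges.py | get_round_winner_all_judges
-- ===== SOURCE A (Python) =====
-- from collections import Counter, defaultdict
--
-- def get_round_winner_all_judges(judge_votes):
--     """
--     Return the majority winner across all judges in one round:
--       - model label (e.g. "A", "B", "Claude", etc.)
--       - "tie" if there's no strictly greater count
--       - None if no votes
--     """
--     tally = Counter()
--     for j, info in judge_votes.items():
--         w = info.get("winner")
--         if w is not None:
--             tally[w] += 1
--
--     if not tally:
--         return None
--
--     best_label, best_count = None, 0
--     multiple_best = False
--     for label, count in tally.items():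
--         if count > best_count:
--             best_label = label
--             best_count = count
--             multiple_best = False
--         elif count == best_count:
--             multiple_best = True
--
--     if multiple_best or best_label == "tie":
--         return "tie"
--     return best_label
-- ===== SOURCE B (Python) =====
-- def get_round_winner_all_judges(judge_votes):
--     # Sort the votes and scan runs of equal labels: no Counter / hash counting.
--     votes = sorted(info.get("winner") for info in judge_votes.values()
--                    if info.get("winner") is not None)
--     if not votes:
--         return None
--     runs = []
--     rest = votes
--     while rest:
--         x = rest[0]
--         n = 1
--         while n < len(rest) and rest[n] == x:
--             n += 1
--         runs.append((x, n))
--         rest = rest[n:]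
--     m = max(c for _, c in runs)
--     tops = [lbl for lbl, c in runs if c == m]
--     if len(tops) > 1 or tops[0] == "tie":
--         return "tie"
--     return tops[0]
-- ===== Notes on version B (the rewrite author's own statement) =====
-- stated objective: alternative
-- what changed: Replaces A's Counter hash-tally plus single-pass best/multiple_best state machine by sorting the vote list and scanning maximal runs of equal labels (run-length encoding), then taking the max run length and the labels attaining it.
import Mathlib
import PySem

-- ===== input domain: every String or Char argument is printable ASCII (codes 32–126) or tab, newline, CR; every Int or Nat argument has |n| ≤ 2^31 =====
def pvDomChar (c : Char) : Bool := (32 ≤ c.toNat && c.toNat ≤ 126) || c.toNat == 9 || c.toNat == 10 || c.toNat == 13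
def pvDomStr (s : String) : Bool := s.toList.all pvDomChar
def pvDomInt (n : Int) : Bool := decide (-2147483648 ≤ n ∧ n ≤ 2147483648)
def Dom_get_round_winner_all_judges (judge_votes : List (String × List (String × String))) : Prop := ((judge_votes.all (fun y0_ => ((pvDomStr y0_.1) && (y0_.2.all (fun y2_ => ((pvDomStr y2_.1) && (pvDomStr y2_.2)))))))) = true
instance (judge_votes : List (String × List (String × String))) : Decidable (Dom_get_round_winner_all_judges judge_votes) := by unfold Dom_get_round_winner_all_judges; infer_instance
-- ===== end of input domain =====

-- B replaces A's Counter tally + single-pass best/multiple_best state machine by sorting the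
-- votes and scanning maximal runs of equal labels; same return value (alternative algorithm).

-- ===== PORT A =====
-- loop body of "for j, info in judge_votes.items(): w = info.get('winner'); if w is not None: tally[w] += 1"
def pvTallyStep (tally : PySem.Dict String Int) (ji : String × List (String × String)) : PySem.Dict String Int :=
  match (PySem.Dict.mk ji.2).get? "winner" with
  | none => tally
  | some w => tally.modify w 0 (· + 1)

-- loop body of "for label, count in tally.items(): …" over state (best_label, best_count, multiple_best)
def pvBestStep (st : Option String × Int × Bool) (p : String × Int) : Option String × Int × Bool :=
  if p.2 > st.2.1 then (some p.1, p.2, false)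
  else if p.2 = st.2.1 then (st.1, st.2.1, true)
  else st

def get_round_winner_all_judges (judge_votes : List (String × List (String × String))) : Option String :=
  let tally := judge_votes.foldl pvTallyStep PySem.Dict.empty
  if tally.items = [] then none
  else
    let st := tally.items.foldl pvBestStep ((none : Option String), (0 : Int), false)
    if st.2.2 || st.1 == some "tie" then some "tie" else st.1

-- ===== PORT B =====
-- the two nested while loops of Source B: peel one maximal run of the leading label at a time
def pvRuns : List String → List (String × Int)
  | [] => []
  | x :: t =>
    (x, 1 + ((t.takeWhile (fun y => y == x)).length : Int)) ::
      pvRuns (t.dropWhile (fun y => y == x))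
termination_by s => s.length
decreasing_by
  simpa using Nat.lt_succ_of_le (List.length_dropWhile_le _ _)

def get_round_winner_all_judges_alt (judge_votes : List (String × List (String × String))) : Option String :=
  let votes := PySem.List.sorted
    (judge_votes.filterMap (fun ji => (PySem.Dict.mk ji.2).get? "winner")) (fun x => x) false
  if votes = [] then none
  else
    let runs := pvRuns votes
    match PySem.List.max? (runs.map (fun p => p.2)) (fun c => c) with
    | none => none   -- unreachable: runs nonempty
    | some m =>
      match runs.filter (fun p => p.2 == m) with
      | [] => none   -- unreachable: the max is attained
      | t :: ts => if !ts.isEmpty || t.1 == "tie" then some "tie" else some t.1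

-- ===== PRECONDITION & SPEC =====
def Spec_get_round_winner_all_judges (judge_votes : List (String × List (String × String))) (out : Option String) : Prop := out = get_round_winner_all_judges_alt judge_votes
instance (judge_votes : List (String × List (String × String))) (out : Option String) : Decidable (Spec_get_round_winner_all_judges judge_votes out) := by unfold Spec_get_round_winner_all_judges; infer_instance

-- ===== CLAIM (what is proved, stated in full; the proofs are below) =====
def Claim_equal_get_round_winner_all_judges : Prop := ∀ (judge_votes : List (String × List (String × String))), Dom_get_round_winner_all_judges judge_votes → Spec_get_round_winner_all_judges judge_votes (get_round_winner_all_judges judge_votes)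

-- ===== LEMMAS AND PROOFS =====

-- the list of non-None winners, in vote order
def pvWinners (jv : List (String × List (String × String))) : List String :=
  jv.filterMap (fun ji => (PySem.Dict.mk ji.2).get? "winner")

lemma pvTally_eq (jv : List (String × List (String × String))) (d : PySem.Dict String Int) :
    jv.foldl pvTallyStep d = (pvWinners jv).foldl (fun d x => d.modify x 0 (· + 1)) d := by
  induction jv generalizing d with
  | nil => rfl
  | cons ji rest ih =>
    simp only [pvWinners, List.filterMap_cons, List.foldl_cons]
    cases h : (PySem.Dict.mk ji.2).get? "winner" with
    | none => simpa [pvTallyStep, h] using ih _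
    | some w => simpa [pvTallyStep, h, pvWinners] using ih _

-- running maximum of the counts (Python's best_count, started at 0)
def pvMx (P : List (String × Int)) : Int := P.foldl (fun a p => max a p.2) 0

lemma pvMx_eq_foldl_map (P : List (String × Int)) : pvMx P = (P.map Prod.snd).foldl max 0 := by
  simp [pvMx, List.foldl_map]

lemma pvMx_le (P : List (String × Int)) (p : String × Int) (hp : p ∈ P) : p.2 ≤ pvMx P := by
  rw [pvMx_eq_foldl_map]
  exact (PySem.List.le_foldl_max _ 0).2 _ (List.mem_map_of_mem hp)

lemma pvMx_append (P : List (String × Int)) (q : String × Int) :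
    pvMx (P ++ [q]) = max (pvMx P) q.2 := by
  simp [pvMx, List.foldl_append]

lemma pvFoldlMax_mem {α : Type} [LinearOrder α] (L : List α) (a : α) : L.foldl max a ∈ a :: L := by
  induction L generalizing a with
  | nil => simp
  | cons x t ih =>
    have h := ih (max a x)
    rw [List.foldl_cons]
    rcases List.mem_cons.mp h with h1 | h1
    · rw [h1]; rcases max_choice a x with h2 | h2 <;> rw [h2] <;> simp
    · exact List.mem_cons.mpr (Or.inr (List.mem_cons.mpr (Or.inr h1)))

lemma pvMx_attained (P : List (String × Int)) (hne : P ≠ []) (hpos : ∀ p ∈ P, 1 ≤ p.2) :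
    ∃ p ∈ P, p.2 = pvMx P := by
  have hmem := pvFoldlMax_mem (P.map Prod.snd) 0
  rw [← pvMx_eq_foldl_map] at hmem
  rcases List.mem_cons.mp hmem with h | h
  · exfalso
    rcases List.exists_mem_of_ne_nil P hne with ⟨p, hp⟩
    have := le_trans (hpos p hp) (pvMx_le P p hp)
    omega
  · rcases List.mem_map.mp h with ⟨p, hp, hpe⟩
    exact ⟨p, hp, hpe⟩

lemma pvMax?_cons_spec (t : List Int) : ∀ (c : Int), ∃ m, PySem.List.max? (c :: t) (fun x => x) = some m ∧ m ∈ c :: t := by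
  induction t with
  | nil => intro c; exact ⟨c, rfl, by simp⟩
  | cons y ys ih =>
    intro c
    have step : PySem.List.max? (c :: y :: ys) (fun x => x) =
        PySem.List.max? ((if c < y then y else c) :: ys) (fun x => x) := by
      unfold PySem.List.max?
      simp only [List.foldl_cons]
      congr 1
      show (if (c : Int) < y then some y else some c) = some (if c < y then y else c)
      exact (apply_ite some _ _ _).symm
    rw [step]
    rcases ih (if c < y then y else c) with ⟨m, h1, h2⟩
    refine ⟨m, h1, ?_⟩
    rcases List.mem_cons.mp h2 with h2 | h2
    · subst h2; split_ifs <;> simp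
    · simp [h2]

lemma pvMax?_spec (L : List Int) (hne : L ≠ []) :
    ∃ m, PySem.List.max? L (fun c => c) = some m ∧ m ∈ L := by
  cases L with
  | nil => exact absurd rfl hne
  | cons x t => exact pvMax?_cons_spec t x

lemma pvFoldA_char (P : List (String × Int)) (hpos : ∀ p ∈ P, 1 ≤ p.2) :
    P.foldl pvBestStep ((none : Option String), (0 : Int), false) =
      ((P.find? (fun p => p.2 == pvMx P)).map Prod.fst, pvMx P,
        decide (2 ≤ P.countP (fun p => p.2 == pvMx P))) := by
  induction P using List.reverseRecOn with
  | nil => simp [pvMx]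
  | append_singleton P q ih =>
    have hpos' : ∀ p ∈ P, 1 ≤ p.2 := fun p hp => hpos p (by simp [hp])
    have hq : 1 ≤ q.2 := hpos q (by simp)
    have hMx := pvMx_append P q
    rw [List.foldl_append, List.foldl_cons, List.foldl_nil, ih hpos']
    by_cases h1 : pvMx P < q.2
    · have hM1 : pvMx (P ++ [q]) = q.2 := by rw [hMx]; omega
      have hnone : P.find? (fun p => p.2 == q.2) = none := by
        apply List.find?_eq_none.mpr
        intro p hp
        have := pvMx_le P p hp
        simp only [beq_iff_eq]
        omega
      have hcnt0 : P.countP (fun p => p.2 == q.2) = 0 := by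
        apply List.countP_eq_zero.mpr
        intro p hp
        have := pvMx_le P p hp
        simp only [beq_iff_eq]
        omega
      rw [hM1, List.find?_append, List.countP_append, hnone, hcnt0]
      simp [pvBestStep, h1]
    · have hne : P ≠ [] := by
        rintro rfl
        simp [pvMx] at h1
        omega
      rcases pvMx_attained P hne hpos' with ⟨a, ha, hae⟩
      have hfs : (P.find? (fun p => p.2 == pvMx P)).isSome := by
        rw [List.find?_isSome]
        exact ⟨a, ha, by simp [hae]⟩
      have hcp : 1 ≤ P.countP (fun p => p.2 == pvMx P) := by
        apply List.countP_pos_iff.mpr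
        exact ⟨a, ha, by simp [hae]⟩
      by_cases h2 : q.2 = pvMx P
      · have hM1 : pvMx (P ++ [q]) = pvMx P := by rw [hMx]; omega
        rw [hM1, List.find?_append, List.countP_append]
        rcases Option.isSome_iff_exists.mp hfs with ⟨f, hf⟩
        simp [pvBestStep, h2, hf]
        exact ⟨a.1, by rw [← hae]; simpa using ha⟩
      · have h3 : q.2 < pvMx P := by omega
        have hM1 : pvMx (P ++ [q]) = pvMx P := by rw [hMx]; omega
        rw [hM1, List.find?_append, List.countP_append]
        have hqn : List.find? (fun p => p.2 == pvMx P) [q] = none := by simp [h2]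
        have hqc : List.countP (fun p => p.2 == pvMx P) [q] = 0 := by simp [h2]
        rw [hqn, hqc]
        simp [pvBestStep, h2]
        omega

lemma pvRuns_sound (s : List String) (hs : s.Pairwise (· ≤ ·)) :
    (∀ p ∈ pvRuns s, p.1 ∈ s ∧ p.2 = (s.count p.1 : Int)) ∧
    (∀ l ∈ s, l ∈ (pvRuns s).map Prod.fst) ∧
    ((pvRuns s).map Prod.fst).Nodup := by
  induction s using pvRuns.induct with
  | case1 => simp [pvRuns]
  | case2 x t ih =>
    have hxt : ∀ y ∈ t, x ≤ y := (List.pairwise_cons.mp hs).1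
    have ht : t.Pairwise (· ≤ ·) := (List.pairwise_cons.mp hs).2
    set a := t.takeWhile (fun y => y == x) with hadef
    set b := t.dropWhile (fun y => y == x) with hbdef
    have hab : a ++ b = t := List.takeWhile_append_dropWhile
    have hxa : ∀ y ∈ a, y = x := by
      intro y hy
      rw [hadef] at hy
      have := List.mem_takeWhile_imp hy
      simpa using this
    have hbt : ∀ z ∈ b, z ∈ t := fun z hz => hab ▸ List.mem_append_right a hz
    have hb_pair : b.Pairwise (· ≤ ·) := List.Pairwise.sublist (List.dropWhile_sublist _) ht
    have hxb : ∀ z ∈ b, x < z := by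
      cases hb : b with
      | nil => simp
      | cons y ys =>
        have hw : t.dropWhile (fun y => y == x) ≠ [] := by rw [← hbdef, hb]; simp
        have hyx : (y == x) = false := by
          have h2 := List.head_dropWhile_not (fun y => y == x) hw
          have h4 : (t.dropWhile (fun y => y == x)).head? = some y := by rw [← hbdef, hb]; rfl
          rw [List.head?_eq_some_head hw] at h4
          rwa [Option.some_inj.mp h4] at h2
        have hy : x < y := lt_of_le_of_ne (hxt y (hbt y (by rw [hb]; simp)))
          (fun h => by simp [← h] at hyx)
        intro z hz
        rcases List.mem_cons.mp hz with rfl | hz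
        · exact hy
        · have : y ≤ z := by
            have := List.pairwise_cons.mp (hb ▸ hb_pair)
            exact this.1 z hz
          exact lt_of_lt_of_le hy this
    have hxnb : x ∉ b := fun h => lt_irrefl x (hxb x h)
    have hca : a.count x = a.length := List.count_eq_length.mpr (fun y hy => (hxa y hy).symm)
    have hcb : b.count x = 0 := List.count_eq_zero.mpr hxnb
    have hcx : (x :: t).count x = a.length + 1 := by
      rw [List.count_cons_self, ← hab, List.count_append, hca, hcb]
    have hct : ∀ l, l ≠ x → (x :: t).count l = b.count l := by
      intro l hl
      rw [← hab]
      simp [List.count_append, Ne.symm hl]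
      have : a.count l = 0 := List.count_eq_zero.mpr (fun h => hl (hxa l h))
      omega
    obtain ⟨ih1, ih2, ih3⟩ := ih hb_pair
    rw [pvRuns]
    refine ⟨?_, ?_, ?_⟩
    · intro p hp
      rcases List.mem_cons.mp hp with rfl | hp
      · constructor
        · simp
        · simp only [← hadef, hcx]
          push_cast
          ring
      · obtain ⟨hp1, hp2⟩ := ih1 p hp
        have hpx : p.1 ≠ x := fun h => lt_irrefl x (h ▸ hxb p.1 hp1)
        refine ⟨List.mem_cons.mpr (Or.inr (hbt _ hp1)), ?_⟩
        rw [hct p.1 hpx]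
        exact hp2
    · intro l hl
      rcases List.mem_cons.mp hl with rfl | hl
      · simp
      · rcases (List.mem_append.mp (hab ▸ hl : l ∈ a ++ b)) with h | h
        · rw [hxa l h]; simp
        · simp only [List.map_cons, List.mem_cons]
          exact Or.inr (ih2 l h)
    · simp only [List.map_cons, List.nodup_cons]
      constructor
      · intro hcon
        rcases List.mem_map.mp hcon with ⟨p, hp, hpe⟩
        exact lt_irrefl x (hpe ▸ hxb p.1 (ih1 p hp).1)
      · exact ih3

-- ===== VERDICT (by name: the statement is the Claim_ definition above) =====
theorem get_round_winner_all_judges_spec : Claim_equal_get_round_winner_all_judges := by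
  intro jv _
  unfold Spec_get_round_winner_all_judges
  set W := pvWinners jv with hWdef
  have hfmW : jv.filterMap (fun ji => (PySem.Dict.mk ji.2).get? "winner") = W := rfl
  have htally : jv.foldl pvTallyStep PySem.Dict.empty = PySem.Dict.counter W := by
    rw [pvTally_eq]; rfl
  have hitems : (PySem.Dict.counter W).items
      = (PySem.Set.ofList W).map (fun k => (k, (W.count k : Int))) := PySem.Dict.items_counter W
  by_cases hW : W = []
  · have hA : get_round_winner_all_judges jv = none := by
      simp only [get_round_winner_all_judges]
      rw [htally, hitems, hW]
      rfl
    have hB : get_round_winner_all_judges_alt jv = none := by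
      simp only [get_round_winner_all_judges_alt]
      rw [hfmW, hW]
      rfl
    rw [hA, hB]
  · -- A-side data
    set P := (PySem.Set.ofList W).map (fun k => (k, (W.count k : Int))) with hPdef
    have hPkeys : P.map Prod.fst = PySem.Set.ofList W := by
      rw [hPdef, List.map_map]
      exact List.map_id _
    have hPne : P ≠ [] := by
      rcases List.exists_mem_of_ne_nil W hW with ⟨w, hw⟩
      have hwof : w ∈ PySem.Set.ofList W := by rw [PySem.Set.mem_ofList]; exact hw
      intro h
      rw [hPdef] at h
      have h2 := List.map_eq_nil_iff.mp h
      rw [h2] at hwof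
      exact absurd hwof (List.not_mem_nil)
    have hPcnt : ∀ p ∈ P, p.2 = (W.count p.1 : Int) := by
      intro p hp
      rw [hPdef] at hp
      rcases List.mem_map.mp hp with ⟨k, hk, rfl⟩
      rfl
    have hPmemW : ∀ p ∈ P, p.1 ∈ W := by
      intro p hp
      rw [hPdef] at hp
      rcases List.mem_map.mp hp with ⟨k, hk, rfl⟩
      rw [PySem.Set.mem_ofList] at hk; exact hk
    have hPpos : ∀ p ∈ P, 1 ≤ p.2 := by
      intro p hp
      rw [hPcnt p hp]
      have := List.count_pos_iff.mpr (hPmemW p hp)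
      exact_mod_cast this
    -- B-side data
    set votes := PySem.List.sorted W (fun x => x) false with hvdef
    have hvW : ∀ l, l ∈ votes ↔ l ∈ W := by
      intro l
      rw [hvdef]
      exact PySem.List.mem_sorted _ _ _ _
    have hvne : votes ≠ [] := by
      rw [hvdef, Ne, PySem.List.sorted_eq_nil_iff]
      exact hW
    have hvpair : votes.Pairwise (· ≤ ·) := by
      have := PySem.List.sorted_pairwise W (fun x => x)
      simpa using this
    have hvcnt : ∀ l, votes.count l = W.count l := by
      intro l
      exact (PySem.List.sorted_perm W (fun x => x) false).count_eq l
    obtain ⟨hR1, hR2, hR3⟩ := pvRuns_sound votes hvpair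
    set R := pvRuns votes with hRdef
    have hRcnt : ∀ p ∈ R, p.2 = (W.count p.1 : Int) := by
      intro p hp
      rw [(hR1 p hp).2, hvcnt]
    have hRposW : ∀ p ∈ R, p.1 ∈ W := fun p hp => (hvW _).mp (hR1 p hp).1
    have hRpos : ∀ p ∈ R, 1 ≤ p.2 := by
      intro p hp
      rw [hRcnt p hp]
      have := List.count_pos_iff.mpr (hRposW p hp)
      exact_mod_cast this
    have hRne : R ≠ [] := by
      cases hv : votes with
      | nil => exact absurd hv hvne
      | cons v vs => rw [hRdef, hv, pvRuns]; simp
    have hkeymemR : ∀ l, l ∈ R.map Prod.fst ↔ l ∈ W := by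
      intro l
      constructor
      · intro h
        rcases List.mem_map.mp h with ⟨p, hp, rfl⟩
        exact hRposW p hp
      · intro h
        exact hR2 l ((hvW l).mpr h)
    have hkperm : (PySem.Set.ofList W).Perm (R.map Prod.fst) := by
      rw [List.perm_ext_iff_of_nodup (PySem.Set.nodup_ofList W) hR3]
      intro a
      rw [PySem.Set.mem_ofList, hkeymemR]
    -- the two maxima agree
    have hMPR : pvMx P = pvMx R := by
      rcases pvMx_attained P hPne hPpos with ⟨p, hp, hpe⟩
      rcases pvMx_attained R hRne hRpos with ⟨q, hq, hqe⟩
      have h1 : pvMx P ≤ pvMx R := by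
        have hm : p.1 ∈ R.map Prod.fst := (hkeymemR p.1).mpr (hPmemW p hp)
        rcases List.mem_map.mp hm with ⟨r, hr, hre⟩
        have he : r.2 = p.2 := by rw [hRcnt r hr, hre, ← hPcnt p hp]
        have := pvMx_le R r hr
        omega
      have h2 : pvMx R ≤ pvMx P := by
        have hmem : (q.1, (W.count q.1 : Int)) ∈ P := by
          rw [hPdef]
          refine List.mem_map_of_mem ?_
          rw [PySem.Set.mem_ofList]
          exact hRposW q hq
        have h3 := pvMx_le P _ hmem
        have h4 := hRcnt q hq
        simp only at h3
        omega
      omega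
    -- the counts of max-achievers agree
    have hcPR : P.countP (fun p => p.2 == pvMx P) = R.countP (fun p => p.2 == pvMx P) := by
      have e1 : P.countP (fun p => p.2 == pvMx P)
          = (PySem.Set.ofList W).countP (fun l => ((W.count l : Int) == pvMx P)) := by
        rw [hPdef, List.countP_map]
        rfl
      have e2 : R.countP (fun p => p.2 == pvMx P)
          = (R.map Prod.fst).countP (fun l => ((W.count l : Int) == pvMx P)) := by
        rw [List.countP_map]
        apply List.countP_congr
        intro p hp
        simp only [Function.comp_apply, hRcnt p hp]
      rw [e1, e2]
      exact hkperm.countP_eq _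
    -- evaluate B's max? to the canonical maximum
    rcases pvMax?_spec (R.map (fun p => p.2)) (by simpa using hRne) with ⟨m, hm, hmm⟩
    have hmM : m = pvMx R := by
      rcases List.mem_map.mp hmm with ⟨q, hq, hqe⟩
      have h1 : m ≤ pvMx R := hqe ▸ pvMx_le R q hq
      rcases pvMx_attained R hRne hRpos with ⟨r, hr, hre⟩
      have h2 : pvMx R ≤ m := by
        have := PySem.List.max?_isMax hm r.2 (List.mem_map_of_mem (f := fun p => p.2) hr)
        simpa [hre] using this
      omega
    -- A's find? succeeds
    rcases pvMx_attained P hPne hPpos with ⟨a, ha, hae⟩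
    have hfs : (P.find? (fun p => p.2 == pvMx P)).isSome := by
      rw [List.find?_isSome]
      exact ⟨a, ha, by simp [hae]⟩
    rcases Option.isSome_iff_exists.mp hfs with ⟨f, hfind⟩
    -- B's filter is nonempty
    have hfilne : R.filter (fun p => p.2 == pvMx R) ≠ [] := by
      rcases pvMx_attained R hRne hRpos with ⟨r, hr, hre⟩
      intro h
      have : r ∈ R.filter (fun p => p.2 == pvMx R) := List.mem_filter.mpr ⟨hr, by simp [hre]⟩
      rw [h] at this
      exact absurd this (List.not_mem_nil)
    cases hF : R.filter (fun p => p.2 == pvMx R) with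
    | nil => exact absurd hF hfilne
    | cons t ts =>
    -- evaluate both ports
    have hA : get_round_winner_all_judges jv =
        (if decide (2 ≤ P.countP (fun p => p.2 == pvMx P)) || (f.1 == "tie")
         then some "tie" else some f.1) := by
      simp only [get_round_winner_all_judges]
      rw [htally, hitems, if_neg hPne, pvFoldA_char P hPpos, hfind]
      simp
    have hB : get_round_winner_all_judges_alt jv =
        (if !ts.isEmpty || (t.1 == "tie") then some "tie" else some t.1) := by
      simp only [get_round_winner_all_judges_alt]
      rw [hfmW, ← hvdef, if_neg hvne, ← hRdef, hm, hmM]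
      simp only [hF]
    rw [hA, hB]
    -- compare the two conditionals
    have hlenF : (t :: ts).length = R.countP (fun p => p.2 == pvMx R) := by
      rw [← hF, ← List.countP_eq_length_filter]
    by_cases h2 : 2 ≤ P.countP (fun p => p.2 == pvMx P)
    · have hts : ts ≠ [] := by
        intro h
        rw [h] at hlenF
        rw [hcPR, hMPR] at h2
        simp at hlenF
        omega
      simp [h2, hts]
    · -- unique winner: the two labels agree
      have hc1 : P.countP (fun p => p.2 == pvMx P) = 1 := by
        have : 1 ≤ P.countP (fun p => p.2 == pvMx P) :=
          List.countP_pos_iff.mpr ⟨a, ha, by simp [hae]⟩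
        omega
      have hts : ts = [] := by
        have := hlenF
        rw [← hMPR, ← hcPR, hc1] at this
        simpa using this
      -- the set of max-achieving labels is a singleton
      have hKF : ((PySem.Set.ofList W).filter (fun l => ((W.count l : Int) == pvMx P))).length = 1 := by
        rw [← List.countP_eq_length_filter]
        have e1 : P.countP (fun p => p.2 == pvMx P)
            = (PySem.Set.ofList W).countP (fun l => ((W.count l : Int) == pvMx P)) := by
          rw [hPdef, List.countP_map]
          rfl
        rw [← e1, hc1]
      rcases List.length_eq_one_iff.mp hKF with ⟨u, hu⟩
      have hfmem := List.mem_of_find?_eq_some hfind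
      have hfpred := List.find?_some hfind
      have hfu : f.1 = u := by
        have h1 : f.1 ∈ PySem.Set.ofList W := by
          rw [← hPkeys]
          exact List.mem_map_of_mem hfmem
        have h3 : f.1 ∈ (PySem.Set.ofList W).filter (fun l => ((W.count l : Int) == pvMx P)) := by
          apply List.mem_filter.mpr
          refine ⟨h1, ?_⟩
          rw [← hPcnt f hfmem]
          exact hfpred
        rw [hu] at h3
        simpa using h3
      have htmem : t ∈ R.filter (fun p => p.2 == pvMx R) := by rw [hF]; simp
      have htR := (List.mem_filter.mp htmem).1
      have htpred := (List.mem_filter.mp htmem).2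
      have htu : t.1 = u := by
        have h1 : t.1 ∈ PySem.Set.ofList W := by rw [PySem.Set.mem_ofList]; exact hRposW t htR
        have h3 : t.1 ∈ (PySem.Set.ofList W).filter (fun l => ((W.count l : Int) == pvMx P)) := by
          apply List.mem_filter.mpr
          refine ⟨h1, ?_⟩
          rw [← hRcnt t htR, hMPR]
          exact htpred
        rw [hu] at h3
        simpa using h3
      rw [hfu, htu, hts]
      simp [h2]
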